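-- pv_equiv track=rewrite | github.com/AhmedWaseem7124/Python-AI-agent-for-WhatsApp-Carpool-Recommendations | parser/message_parser.py | _title_case_location
-- ===== SOURCE A (Python) =====
-- KNOWN_LOCATIONS = [
--     "dha",
--     "defence",
--     "clifton",
--     "iba",
--     "gulshan",
--     "pechs",
--     "bahadurabad",
--     "saddar",
--     "korangi",
--     "johar",
--     "north nazimabad",
--     "malir",
--     "bahria town",
--     "shahrah-e-faisal",
--     "airport",
--     "airport road",
--     "university road",
-- ]
--
-- LOCATION_DISPLAY_OVERRIDES = {
--     "dha": "DHA",
--     "iba": "IBA",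
--     "pechs": "PECHS",
-- }
--
-- def _title_case_location(value: str) -> str:
--     lowered = value.strip()
--     if lowered.lower() in LOCATION_DISPLAY_OVERRIDES:
--         return LOCATION_DISPLAY_OVERRIDES[lowered.lower()]
--     if lowered.lower() in {location.lower() for location in KNOWN_LOCATIONS}:
--         for location in KNOWN_LOCATIONS:
--             if lowered.lower() == location.lower():
--                 return location.title() if location.islower() else location
--     return " ".join(part.capitalize() if part else part for part in lowered.split())
-- ===== SOURCE B (Python) =====
-- # Table-driven rewrite: one precomputed lowercase->display dict replaces the
-- # override check + lowered-set membership + linear search loop of the original.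
-- DISPLAY = {
--     "dha": "DHA",
--     "defence": "Defence",
--     "clifton": "Clifton",
--     "iba": "IBA",
--     "gulshan": "Gulshan",
--     "pechs": "PECHS",
--     "bahadurabad": "Bahadurabad",
--     "saddar": "Saddar",
--     "korangi": "Korangi",
--     "johar": "Johar",
--     "north nazimabad": "North Nazimabad",
--     "malir": "Malir",
--     "bahria town": "Bahria Town",
--     "shahrah-e-faisal": "Shahrah-E-Faisal",
--     "airport": "Airport",
--     "airport road": "Airport Road",
--     "university road": "University Road",
-- }
--
-- def _title_case_location(value: str) -> str:
--     stripped = value.strip()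
--     hit = DISPLAY.get(stripped.lower())
--     if hit is not None:
--         return hit
--     return " ".join(part.capitalize() for part in stripped.split())
-- ===== Notes on version B (the rewrite author's own statement) =====
-- stated objective: simpler
-- what changed: Replaced the override-dict check, the lowered-set membership test and the linear search loop over KNOWN_LOCATIONS (with per-entry .title()/.islower() work) by one precomputed lowercase->display table consulted with a single dict lookup; only the whitespace-splitting capitalize fallback remains.
import Mathlib
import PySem

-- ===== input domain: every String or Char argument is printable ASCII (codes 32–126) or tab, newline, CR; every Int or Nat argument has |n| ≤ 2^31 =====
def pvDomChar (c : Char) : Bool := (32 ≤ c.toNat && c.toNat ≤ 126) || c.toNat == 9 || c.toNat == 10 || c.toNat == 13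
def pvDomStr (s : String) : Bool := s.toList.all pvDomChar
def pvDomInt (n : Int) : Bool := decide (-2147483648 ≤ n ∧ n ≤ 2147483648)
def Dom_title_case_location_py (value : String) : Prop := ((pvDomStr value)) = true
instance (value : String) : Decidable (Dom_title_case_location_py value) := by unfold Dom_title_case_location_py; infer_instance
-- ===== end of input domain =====

-- B replaces A's override-dict check + lowered-set membership + linear search loop by one
-- precomputed lowercase->display table consulted with a single lookup (objective: simpler).

-- ===== PORT A =====
-- hand port of str.capitalize (first char to upper, rest to lower); exact on the ASCII domain
def pyCapChars : List Char → List Char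
  | [] => []
  | c :: rest => PySem.Chars.upperChar c :: rest.map PySem.Chars.lowerChar
def pyCapitalize (s : String) : String := String.ofList (pyCapChars s.toList)

-- hand port of str.title: uppercase a letter after a non-cased char, lowercase otherwise; exact on ASCII (cased = isalpha)
def pyTitleChars : Bool → List Char → List Char
  | _, [] => []
  | prevCased, c :: rest =>
    (if PySem.Chars.isalpha c then
       (if prevCased then PySem.Chars.lowerChar c else PySem.Chars.upperChar c)
     else c) :: pyTitleChars (PySem.Chars.isalpha c) rest
def pyTitle (s : String) : String := String.ofList (pyTitleChars false s.toList)

-- hand port of str.islower: at least one cased char, and every cased char lowercase; exact on ASCII (cased = isalpha)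
def pyIslower (s : String) : Bool :=
  s.toList.any PySem.Chars.isalpha && s.toList.all (fun c => !PySem.Chars.isalpha c || PySem.Chars.islower c)

def knownLocationsA : List String :=
  ["dha", "defence", "clifton", "iba", "gulshan", "pechs", "bahadurabad", "saddar",
   "korangi", "johar", "north nazimabad", "malir", "bahria town", "shahrah-e-faisal",
   "airport", "airport road", "university road"]

def overridesA : PySem.Dict String String :=
  PySem.Dict.mk [("dha", "DHA"), ("iba", "IBA"), ("pechs", "PECHS")]

-- the for-loop over KNOWN_LOCATIONS: return on the first lowered match, else fall through (none)
def locLoopA (key : String) : List String → Option String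
  | [] => none
  | loc :: rest =>
    if key == PySem.Str.lower loc then
      some (if pyIslower loc then pyTitle loc else loc)
    else locLoopA key rest

def title_case_location_py (value : String) : String :=
  if overridesA.contains (PySem.Str.lower (PySem.Str.strip value)) then
    -- dict subscript under the 'in' guard: get? is some here; getD "" is the guarded dict[k]
    (overridesA.get? (PySem.Str.lower (PySem.Str.strip value))).getD ""
  else if (PySem.Set.ofList (knownLocationsA.map PySem.Str.lower)).contains
            (PySem.Str.lower (PySem.Str.strip value)) then
    match locLoopA (PySem.Str.lower (PySem.Str.strip value)) knownLocationsA with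
    | some r => r
    | none =>
      PySem.Str.join " " ((PySem.Str.split₀ (PySem.Str.strip value)).map
        (fun part => if part == "" then part else pyCapitalize part))
  else
    PySem.Str.join " " ((PySem.Str.split₀ (PySem.Str.strip value)).map
      (fun part => if part == "" then part else pyCapitalize part))

-- ===== PORT B =====
def displayB : PySem.Dict String String :=
  PySem.Dict.mk
    [("dha", "DHA"), ("defence", "Defence"), ("clifton", "Clifton"), ("iba", "IBA"),
     ("gulshan", "Gulshan"), ("pechs", "PECHS"), ("bahadurabad", "Bahadurabad"),
     ("saddar", "Saddar"), ("korangi", "Korangi"), ("johar", "Johar"),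
     ("north nazimabad", "North Nazimabad"), ("malir", "Malir"),
     ("bahria town", "Bahria Town"), ("shahrah-e-faisal", "Shahrah-E-Faisal"),
     ("airport", "Airport"), ("airport road", "Airport Road"),
     ("university road", "University Road")]

def title_case_location_py_alt (value : String) : String :=
  match displayB.get? (PySem.Str.lower (PySem.Str.strip value)) with
  | some hit => hit
  | none =>
    PySem.Str.join " " ((PySem.Str.split₀ (PySem.Str.strip value)).map
      (fun part => pyCapitalize part))

-- ===== PRECONDITION & SPEC =====
def Spec_title_case_location_py (value : String) (out : String) : Prop := out = title_case_location_py_alt value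
instance (value : String) (out : String) : Decidable (Spec_title_case_location_py value out) := by unfold Spec_title_case_location_py; infer_instance

-- ===== CLAIM (what is proved, stated in full; the proofs are below) =====
def Claim_equal_title_case_location_py : Prop := ∀ (value : String), Dom_title_case_location_py value → Spec_title_case_location_py value (title_case_location_py value)

-- ===== LEMMAS AND PROOFS =====
-- str.split() never produces an empty word: invariant for the split₀ accumulator loop
lemma split₀_go_ne_nil (cs : List Char) : ∀ (cur : List Char) (acc : List (List Char)),
    (∀ w ∈ acc, w ≠ ([] : List Char)) →
    ∀ w ∈ PySem.Chars.split₀.go cs cur acc, w ≠ ([] : List Char) := by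
  induction cs with
  | nil =>
    intro cur acc hacc w hw
    unfold PySem.Chars.split₀.go at hw
    by_cases hc : cur.isEmpty
    · simp [hc] at hw
      exact hacc w hw
    · simp [hc] at hw
      rcases hw with h | h
      all_goals first
        | exact hacc w h
        | (subst h; simp only [List.isEmpty_iff] at hc; simpa using hc)
  | cons c rest ih =>
    intro cur acc hacc w hw
    unfold PySem.Chars.split₀.go at hw
    by_cases hs : PySem.Chars.isspace c
    · by_cases hc : cur.isEmpty
      · simp [hs, hc] at hw
        exact ih [] acc hacc w hw
      · simp [hs, hc] at hw
        refine ih [] (cur.reverse :: acc) ?_ w hw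
        intro u hu
        rcases List.mem_cons.mp hu with h | h
        all_goals first
          | exact hacc u h
          | (subst h; simp only [List.isEmpty_iff] at hc; simpa using hc)
    · simp [hs] at hw
      exact ih (c :: cur) acc hacc w hw

lemma split₀_ne_empty (s : String) : ∀ p ∈ PySem.Str.split₀ s, p ≠ "" := by
  intro p hp
  unfold PySem.Str.split₀ at hp
  rcases List.mem_map.mp hp with ⟨w, hw, rfl⟩
  have hne : w ≠ ([] : List Char) := by
    unfold PySem.Chars.split₀ at hw
    exact split₀_go_ne_nil s.toList [] [] (by simp) w hw
  intro h
  apply hne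
  have := congrArg String.toList h
  simpa using this

-- the core equality: case split on the lowered stripped key
lemma core (v : String) : title_case_location_py v = title_case_location_py_alt v := by
  unfold title_case_location_py title_case_location_py_alt
  generalize PySem.Str.strip v = s
  generalize hk : PySem.Str.lower s = k
  by_cases h1 : k = "dha"; · subst h1; rfl
  by_cases h2 : k = "defence"; · subst h2; rfl
  by_cases h3 : k = "clifton"; · subst h3; rfl
  by_cases h4 : k = "iba"; · subst h4; rfl
  by_cases h5 : k = "gulshan"; · subst h5; rfl
  by_cases h6 : k = "pechs"; · subst h6; rfl
  by_cases h7 : k = "bahadurabad"; · subst h7; rfl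
  by_cases h8 : k = "saddar"; · subst h8; rfl
  by_cases h9 : k = "korangi"; · subst h9; rfl
  by_cases h10 : k = "johar"; · subst h10; rfl
  by_cases h11 : k = "north nazimabad"; · subst h11; rfl
  by_cases h12 : k = "malir"; · subst h12; rfl
  by_cases h13 : k = "bahria town"; · subst h13; rfl
  by_cases h14 : k = "shahrah-e-faisal"; · subst h14; rfl
  by_cases h15 : k = "airport"; · subst h15; rfl
  by_cases h16 : k = "airport road"; · subst h16; rfl
  by_cases h17 : k = "university road"; · subst h17; rfl
  -- k matches no table entry: both sides fall to the capitalize-join fallback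
  have hmap : knownLocationsA.map PySem.Str.lower = knownLocationsA := by decide
  have hov : overridesA.contains k = false := by
    simp [overridesA, PySem.Dict.contains_mk, Ne.symm h1, Ne.symm h4, Ne.symm h6]
  have hset : (PySem.Set.ofList (knownLocationsA.map PySem.Str.lower)).contains k = false := by
    rw [hmap, Bool.eq_false_iff, Ne, PySem.Set.contains_iff, PySem.Set.mem_ofList]
    simp [knownLocationsA, h1, h2, h3, h4, h5, h6, h7, h8, h9, h10, h11, h12, h13, h14, h15, h16, h17]
  have hget : displayB.get? k = none := by
    simp [displayB, PySem.Dict.get?,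
      Ne.symm h1, Ne.symm h2, Ne.symm h3, Ne.symm h4, Ne.symm h5, Ne.symm h6, Ne.symm h7,
      Ne.symm h8, Ne.symm h9, Ne.symm h10, Ne.symm h11, Ne.symm h12, Ne.symm h13, Ne.symm h14,
      Ne.symm h15, Ne.symm h16, Ne.symm h17]
  rw [hget]
  simp only [hov, hset, Bool.false_eq_true, if_false]
  congr 1
  apply List.map_congr_left
  intro p hp
  have hne := split₀_ne_empty s p hp
  simp [hne]

-- ===== VERDICT (by name: the statement is the Claim_ definition above) =====
theorem title_case_location_py_spec : Claim_equal_title_case_location_py := by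
  intro value _
  unfold Spec_title_case_location_py
  exact core value
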